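-- pv_equiv track=rewrite | github.com/sam15211521/little-computer-python-practice | codecademy scripts/Python Code Challenges -loops/4-Odd Indicies/4-Odd Indicies.py | odd_indices
-- ===== SOURCE A (Python) =====
-- def odd_indices(lst):
--     lst2 = []
--     i = 0
--     for num in lst:
--         if i %2 != 0:
--             lst2.append(num)
--             i += 1
--         else:
--             i +=1
--     return lst2
-- ===== SOURCE B (Python) =====
-- def odd_indices(lst):
--     result = []
--     for i in range(1, len(lst), 2):
--         result.append(lst[i])
--     return result
-- ===== Notes on version B (the rewrite author's own statement) =====
-- stated objective: alternative
-- what changed: Instead of scanning every element while maintaining a parity counter and branching per element, B iterates directly over the odd index positions with range(1, len(lst), 2) and indexes into the list, so only the selected positions are visited and no per-element branch exists.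
import Mathlib
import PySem

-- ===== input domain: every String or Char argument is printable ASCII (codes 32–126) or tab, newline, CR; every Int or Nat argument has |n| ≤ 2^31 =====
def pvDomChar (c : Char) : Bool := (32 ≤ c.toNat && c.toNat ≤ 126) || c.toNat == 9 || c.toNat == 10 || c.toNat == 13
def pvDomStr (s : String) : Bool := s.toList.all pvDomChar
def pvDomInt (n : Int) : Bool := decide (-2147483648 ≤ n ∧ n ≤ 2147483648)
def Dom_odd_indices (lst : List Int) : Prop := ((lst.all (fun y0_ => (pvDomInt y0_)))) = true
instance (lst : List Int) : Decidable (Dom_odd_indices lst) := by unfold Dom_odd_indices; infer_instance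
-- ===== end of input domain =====

-- B iterates directly over the odd index positions (range(1, len, 2)) instead of
-- scanning every element with a parity counter; same output, alternative traversal.

-- ===== PORT A =====
-- literal port of A: fold over the elements with state (lst2, i), branching on i % 2
def odd_indices (lst : List Int) : List Int :=
  (lst.foldl
    (fun (s : List Int × Int) num =>
      if s.2 % 2 ≠ 0 then (s.1 ++ [num], s.2 + 1) else (s.1, s.2 + 1))
    (([] : List Int), (0 : Int))).1

-- ===== PORT B =====
-- literal port of B: loop i over range(1, len(lst), 2), appending lst[i]
def odd_indices_alt (lst : List Int) : List Int :=
  (PySem.List.pyRange 1 (lst.length : Int) 2).foldl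
    (fun acc i => acc ++ [(PySem.List.pyGet? lst i).getD 0]) []

-- ===== PRECONDITION & SPEC =====
def Spec_odd_indices (lst : List Int) (out : List Int) : Prop := out = odd_indices_alt lst
instance (lst : List Int) (out : List Int) : Decidable (Spec_odd_indices lst out) := by unfold Spec_odd_indices; infer_instance

-- ===== CLAIM (what is proved, stated in full; the proofs are below) =====
def Claim_equal_odd_indices : Prop := ∀ (lst : List Int), Dom_odd_indices lst → Spec_odd_indices lst (odd_indices lst)

-- ===== LEMMAS AND PROOFS =====

-- elements at "odd" positions, tracked by a boolean parity flag
def oddsAux (b : Bool) : List Int → List Int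
  | [] => []
  | x :: t => if b then x :: oddsAux (!b) t else oddsAux (!b) t

lemma foldA_eq (lst : List Int) : ∀ (acc : List Int) (i : Int),
    (lst.foldl
      (fun (s : List Int × Int) num =>
        if s.2 % 2 ≠ 0 then (s.1 ++ [num], s.2 + 1) else (s.1, s.2 + 1))
      (acc, i)).1 = acc ++ oddsAux (decide (i % 2 ≠ 0)) lst := by
  induction lst with
  | nil => intro acc i; simp [oddsAux]
  | cons x t ih =>
    intro acc i
    simp only [List.foldl_cons]
    by_cases h : i % 2 = 0
    · have hd : decide (i % 2 ≠ 0) = false := by simp [h]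
      have hd1 : decide ((i + 1) % 2 ≠ 0) = true := by simp; omega
      rw [if_neg (by simp [h]), ih, hd, hd1]
      simp [oddsAux]
    · have hd : decide (i % 2 ≠ 0) = true := by simp [h]
      have hd1 : decide ((i + 1) % 2 ≠ 0) = false := by simp; omega
      rw [if_pos (by simp [h]), ih, hd, hd1]
      simp [oddsAux]

lemma a_eq_oddsAux (lst : List Int) : odd_indices lst = oddsAux false lst := by
  unfold odd_indices
  rw [foldA_eq lst [] 0]
  simp

lemma map_range_half : ∀ (n : Nat) (t : List Int), t.length = n →
    (List.range (t.length / 2)).map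
      (fun (k : Nat) => (PySem.List.pyGet? t (1 + 2 * (k : Int))).getD 0) = oddsAux false t := by
  intro n
  induction n using Nat.strong_induction_on with
  | _ n ih =>
    intro t hn
    match t with
    | [] => simp [oddsAux]
    | [a] => simp [oddsAux]
    | a :: b :: t' =>
      have hlt : t'.length < n := by simp at hn; omega
      have hdiv : (a :: b :: t').length / 2 = t'.length / 2 + 1 := by
        simp; omega
      rw [hdiv, List.range_succ_eq_map, List.map_cons, List.map_map]
      have h0 : (PySem.List.pyGet? (a :: b :: t') (1 + 2 * ((0 : Nat) : Int))).getD 0 = b := by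
        simp [PySem.List.pyGet?, PySem.List.pyIdx?]
      have hshift : ∀ k : Nat,
          PySem.List.pyGet? (a :: b :: t') (1 + 2 * (((k + 1 : Nat)) : Int))
            = PySem.List.pyGet? t' (1 + 2 * (k : Int)) := by
        intro k
        rw [PySem.List.pyGet?_of_nonneg _ (by omega),
            PySem.List.pyGet?_of_nonneg _ (by omega)]
        have h2 : (1 + 2 * (((k + 1 : Nat)) : Int)).toNat = (1 + 2 * (k : Int)).toNat + 2 := by
          omega
        rw [h2]
        simp
      have hfun : ((fun (k : Nat) => (PySem.List.pyGet? (a :: b :: t') (1 + 2 * (k : Int))).getD 0)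
            ∘ (fun k : Nat => k + 1))
          = fun k : Nat => (PySem.List.pyGet? t' (1 + 2 * (k : Int))).getD 0 := by
        funext k
        simp only [Function.comp_apply]
        rw [show ((k + 1 : Nat) : Int) = (((k + 1 : Nat)) : Int) from rfl, hshift k]
      rw [hfun, ih t'.length hlt t' rfl, h0]
      simp [oddsAux]

lemma b_eq_oddsAux (lst : List Int) : odd_indices_alt lst = oddsAux false lst := by
  unfold odd_indices_alt
  rw [PySem.List.foldl_append_singleton_eq_map]
  rw [PySem.List.pyRange_of_pos _ _ (by norm_num)]
  have hm : (if (1 : Int) < (lst.length : Int)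
      then (((lst.length : Int) - 1 + 2 - 1) / 2).toNat else 0) = lst.length / 2 := by
    split <;> omega
  rw [hm, List.map_map, List.nil_append]
  have hfun : ((fun i => (PySem.List.pyGet? lst i).getD 0) ∘ fun k : Nat => 1 + 2 * (k : Int))
      = fun (k : Nat) => (PySem.List.pyGet? lst (1 + 2 * (k : Int))).getD 0 := rfl
  rw [hfun, map_range_half lst.length lst rfl]

-- ===== VERDICT (by name: the statement is the Claim_ definition above) =====
theorem odd_indices_spec : Claim_equal_odd_indices := by
  intro lst _
  unfold Spec_odd_indices
  rw [a_eq_oddsAux, b_eq_oddsAux]
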